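-- pv_equiv track=rewrite | github.com/GissurM/cfDNA_Nanopore | Telomeric_analysis/Telomeric_analysis.py | scan_motifs_in_sequence
-- ===== SOURCE A (Python) =====
-- INVALID_PATTERNS = ["TTAAGG", "CCCTAG", "TTAGAC", "CCCTAT"]  # Removed TTAGAG - it's a valid G->A transition
--
-- def is_valid_telomeric_variant(segment, motif, mismatch_positions):
--     """Check if a segment with mismatches is a valid telomeric variant with balanced biological constraints."""
--     if len(mismatch_positions) != 1:
--         return False
--
--     mismatch_pos = mismatch_positions[0]
--     observed_base = segment[mismatch_pos]
--
--     # More restrictive validation - only allow biologically plausible substitutions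
--     if motif == "TTAGGG":
--         # For forward motif, be more strict about allowed substitutions
--         if mismatch_pos == 0:  # First T
--             return observed_base in ['C']  # Only T->C transition
--         elif mismatch_pos == 1:  # Second T
--             return observed_base in ['C']  # Only T->C transition
--         elif mismatch_pos == 2:  # A
--             return observed_base in ['G']  # Only A->G transition
--         elif mismatch_pos == 3:  # G
--             return observed_base in ['A']  # Only G->A transition
--         elif mismatch_pos == 4:  # G
--             return observed_base in ['A']  # Only G->A transition
--         elif mismatch_pos == 5:  # G
--             return observed_base in ['A']  # Only G->A transition
--
--     elif motif == "CCCTAA":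
--         # For reverse motif, apply symmetric constraints
--         if mismatch_pos == 0:  # C
--             return observed_base in ['T']  # Only C->T transition
--         elif mismatch_pos == 1:  # C
--             return observed_base in ['T']  # Only C->T transition
--         elif mismatch_pos == 2:  # C
--             return observed_base in ['T']  # Only C->T transition
--         elif mismatch_pos == 3:  # T
--             return observed_base in ['C']  # Only T->C transition
--         elif mismatch_pos == 4:  # A
--             return observed_base in ['G']  # Only A->G transition
--         elif mismatch_pos == 5:  # A
--             return observed_base in ['G']  # Only A->G transition
--
--     # Special cases: reject systematic non-telomeric patterns but allow valid variants
--     if segment in INVALID_PATTERNS: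
--         return False
--
--     return True  # Allow valid biological transitions
--
-- def scan_motifs_in_sequence(sequence, motif, max_mismatches=1):
--     """
--     Scan sequence for valid motif occurrences, returning positions and count.
--     Consolidates the motif scanning logic used by multiple functions.
--     """
--     motif_len = len(motif)
--     sequence = sequence.upper()
--     motif = motif.upper()
--
--     valid_positions = []
--     pos = 0
--
--     while pos <= len(sequence) - motif_len:
--         # Check if current position matches motif (allowing mismatches)
--         mismatches = 0
--         mismatch_positions = []
--
--         for i in range(motif_len):
--             if sequence[pos + i] != motif[i]:
--                 mismatches += 1
--                 mismatch_positions.append(i)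
--                 if mismatches > max_mismatches:
--                     break
--
--         # Check if this is a valid motif
--         if mismatches <= max_mismatches:
--             if mismatches == 0:
--                 is_valid = True
--             else:
--                 # Single mismatch - check if it's a valid telomeric variant
--                 segment = sequence[pos:pos+motif_len]
--                 is_valid = is_valid_telomeric_variant(segment, motif, mismatch_positions)
--
--             if is_valid:
--                 valid_positions.append(pos)
--
--         pos += 1
--
--     return valid_positions
-- ===== SOURCE B (Python) =====
-- INVALID_PATTERNS = ["TTAAGG", "CCCTAG", "TTAGAC", "CCCTAT"]  # Removed TTAGAG - it's a valid G->A transition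
--
-- def is_valid_telomeric_variant(segment, motif, mismatch_positions):
--     """Check if a segment with mismatches is a valid telomeric variant with balanced biological constraints."""
--     if len(mismatch_positions) != 1:
--         return False
--
--     mismatch_pos = mismatch_positions[0]
--     observed_base = segment[mismatch_pos]
--
--     if motif == "TTAGGG":
--         if mismatch_pos == 0:
--             return observed_base in ['C']
--         elif mismatch_pos == 1:
--             return observed_base in ['C']
--         elif mismatch_pos == 2:
--             return observed_base in ['G']
--         elif mismatch_pos == 3:
--             return observed_base in ['A']
--         elif mismatch_pos == 4:
--             return observed_base in ['A']
--         elif mismatch_pos == 5: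
--             return observed_base in ['A']
--
--     elif motif == "CCCTAA":
--         if mismatch_pos == 0:
--             return observed_base in ['T']
--         elif mismatch_pos == 1:
--             return observed_base in ['T']
--         elif mismatch_pos == 2:
--             return observed_base in ['T']
--         elif mismatch_pos == 3:
--             return observed_base in ['C']
--         elif mismatch_pos == 4:
--             return observed_base in ['G']
--         elif mismatch_pos == 5:
--             return observed_base in ['G']
--
--     if segment in INVALID_PATTERNS:
--         return False
--
--     return True
--
--
-- def scan_motifs_in_sequence(sequence, motif, max_mismatches=1):
--     """One pass; each window is tested by whole-string equality, else by locating the single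
--     mismatch (first differing index + equal tails) and validating it."""
--     seq = sequence.upper()
--     mot = motif.upper()
--     n = len(mot)
--     positions = []
--     for pos in range(len(seq) - n + 1):
--         window = seq[pos:pos + n]
--         if window == mot:
--             positions.append(pos)
--         elif max_mismatches >= 1:
--             i = next(k for k in range(n) if window[k] != mot[k])
--             if window[i + 1:] == mot[i + 1:] and is_valid_telomeric_variant(window, mot, [i]):
--                 positions.append(pos)
--     return positions
-- ===== Notes on version B (the rewrite author's own statement) =====
-- stated objective: alternative
-- what changed: A counts mismatches character-by-character at each window with a counter, a growing mismatch-position list and an early break; B instead tests each window by whole-string equality against the motif and, failing that, locates the unique candidate mismatch as the first differing index and accepts iff the tails after it are equal and the unchanged validity helper approves it. Pre_ restricts to the natural domain of non-negative mismatch counts: on negative max_mismatches A rejects even exact matches and returns [], an artefact B does not mirror.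
-- outside the precondition, e.g. on scan_motifs_in_sequence('TTAGGG', 'TTAGGG', -1): A returns [], B returns [0]
import Mathlib
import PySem

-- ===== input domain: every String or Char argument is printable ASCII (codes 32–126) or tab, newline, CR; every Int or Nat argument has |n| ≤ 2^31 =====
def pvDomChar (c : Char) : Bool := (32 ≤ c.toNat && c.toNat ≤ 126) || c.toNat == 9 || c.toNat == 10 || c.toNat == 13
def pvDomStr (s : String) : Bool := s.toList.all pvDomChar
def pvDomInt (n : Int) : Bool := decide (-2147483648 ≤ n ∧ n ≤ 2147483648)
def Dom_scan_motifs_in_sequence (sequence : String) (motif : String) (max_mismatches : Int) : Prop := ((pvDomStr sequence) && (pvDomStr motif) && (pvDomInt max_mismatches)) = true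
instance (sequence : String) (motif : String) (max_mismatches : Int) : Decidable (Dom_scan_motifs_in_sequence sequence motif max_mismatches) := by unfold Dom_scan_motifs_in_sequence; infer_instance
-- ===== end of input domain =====

-- B replaces A's mismatch-counting loop (counter + position list + early break) by a different
-- per-window decomposition: whole-window equality, else first differing index + equal-tails check.

-- ===== PORT A =====
def pvInvalidPatterns : List (List Char) :=
  [['T','T','A','A','G','G'], ['C','C','C','T','A','G'], ['T','T','A','G','A','C'], ['C','C','C','T','A','T']]

def is_valid_telomeric_variant (segment : List Char) (motif : List Char) (mismatch_positions : List Int) : Bool :=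
  if mismatch_positions.length ≠ 1 then false
  else
    let mismatch_pos : Int := PySem.List.pyGetD mismatch_positions 0 0
    let observed_base : Char := PySem.List.pyGetD segment mismatch_pos '?'
    if motif = ['T','T','A','G','G','G'] then
      if mismatch_pos = 0 then decide (observed_base = 'C')
      else if mismatch_pos = 1 then decide (observed_base = 'C')
      else if mismatch_pos = 2 then decide (observed_base = 'G')
      else if mismatch_pos = 3 then decide (observed_base = 'A')
      else if mismatch_pos = 4 then decide (observed_base = 'A')
      else if mismatch_pos = 5 then decide (observed_base = 'A')
      else decide (segment ∉ pvInvalidPatterns)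
    else if motif = ['C','C','C','T','A','A'] then
      if mismatch_pos = 0 then decide (observed_base = 'T')
      else if mismatch_pos = 1 then decide (observed_base = 'T')
      else if mismatch_pos = 2 then decide (observed_base = 'T')
      else if mismatch_pos = 3 then decide (observed_base = 'C')
      else if mismatch_pos = 4 then decide (observed_base = 'G')
      else if mismatch_pos = 5 then decide (observed_base = 'G')
      else decide (segment ∉ pvInvalidPatterns)
    else decide (segment ∉ pvInvalidPatterns)

def pvScanInner (s m : List Char) (pos maxm : Int) (i : Nat) (mismatches : Int) (mps : List Int) : Int × List Int :=
  if i < m.length then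
    if PySem.List.pyGetD s (pos + (i : Int)) '?' ≠ PySem.List.pyGetD m (i : Int) '?' then
      let mm := mismatches + 1
      let mp := mps ++ [(i : Int)]
      if mm > maxm then (mm, mp)
      else pvScanInner s m pos maxm (i+1) mm mp
    else pvScanInner s m pos maxm (i+1) mismatches mps
  else (mismatches, mps)
termination_by m.length - i

def pvScanOuter (s m : List Char) (maxm : Int) (pos : Int) (acc : List Int) : List Int :=
  if h : pos ≤ (s.length : Int) - (m.length : Int) then
    let r := pvScanInner s m pos maxm 0 0 []
    let acc' :=
      if r.1 ≤ maxm then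
        let is_valid := if r.1 = 0 then true
          else is_valid_telomeric_variant (PySem.List.slice s (some pos) (some (pos + (m.length : Int)))) m r.2
        if is_valid then acc ++ [pos] else acc
      else acc
    pvScanOuter s m maxm (pos + 1) acc'
  else acc
termination_by ((s.length : Int) - (m.length : Int) + 1 - pos).toNat
decreasing_by omega

def scan_motifs_in_sequence (sequence : String) (motif : String) (max_mismatches : Int) : List Int :=
  pvScanOuter (PySem.Chars.upper sequence.toList) (PySem.Chars.upper motif.toList) max_mismatches 0 []

-- ===== PORT B =====
-- next(k for k in range(n) if window[k] != mot[k]); the else-branch value 0 is never reached: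
-- Python's next() is only evaluated when window ≠ mot, so a first differing index exists.
def pvFirstDiff (window m : List Char) (k : Nat) : Int :=
  if k < m.length then
    if PySem.List.pyGetD window (k : Int) '?' ≠ PySem.List.pyGetD m (k : Int) '?' then (k : Int)
    else pvFirstDiff window m (k + 1)
  else 0
termination_by m.length - k

def scan_motifs_in_sequence_alt (sequence : String) (motif : String) (max_mismatches : Int) : List Int :=
  let s := PySem.Chars.upper sequence.toList
  let m := PySem.Chars.upper motif.toList
  (PySem.List.pyRange 0 ((s.length : Int) - (m.length : Int) + 1) 1).foldl
    (fun acc pos =>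
      let window := PySem.List.slice s (some pos) (some (pos + (m.length : Int)))
      if window = m then acc ++ [pos]
      else if max_mismatches ≥ 1 then
        let i := pvFirstDiff window m 0
        if PySem.List.slice window (some (i + 1)) none = PySem.List.slice m (some (i + 1)) none ∧
            is_valid_telomeric_variant window m [i] = true then acc ++ [pos] else acc
      else acc) []

-- ===== PRECONDITION & SPEC =====
-- Pre_ restricts to the natural domain of non-negative mismatch counts; on negative
-- max_mismatches A rejects even exact matches and returns [], an artefact B does not mirror.
def Pre_scan_motifs_in_sequence (sequence : String) (motif : String) (max_mismatches : Int) : Prop :=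
  0 ≤ max_mismatches
instance (sequence : String) (motif : String) (max_mismatches : Int) : Decidable (Pre_scan_motifs_in_sequence sequence motif max_mismatches) := by unfold Pre_scan_motifs_in_sequence; infer_instance

def pvWitness_scan_motifs_in_sequence : String × String × Int := ("GGTTAGGGTTAGAGG", "TTAGGG", 1)

def Spec_scan_motifs_in_sequence (sequence : String) (motif : String) (max_mismatches : Int) (out : List Int) : Prop := out = scan_motifs_in_sequence_alt sequence motif max_mismatches
instance (sequence : String) (motif : String) (max_mismatches : Int) (out : List Int) : Decidable (Spec_scan_motifs_in_sequence sequence motif max_mismatches out) := by unfold Spec_scan_motifs_in_sequence; infer_instance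

-- ===== CLAIM (what is proved, stated in full; the proofs are below) =====
def Claim_equal_scan_motifs_in_sequence : Prop := ∀ (sequence : String) (motif : String) (max_mismatches : Int), Dom_scan_motifs_in_sequence sequence motif max_mismatches → Pre_scan_motifs_in_sequence sequence motif max_mismatches → Spec_scan_motifs_in_sequence sequence motif max_mismatches (scan_motifs_in_sequence sequence motif max_mismatches)

-- ===== LEMMAS AND PROOFS =====
def pvPred (s m : List Char) (pos : Int) (k : Nat) : Bool :=
  decide (PySem.List.pyGetD s (pos + (k : Int)) '?' ≠ PySem.List.pyGetD m (k : Int) '?')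

theorem pvScanInner_spec (s m : List Char) (pos maxm : Int) :
    ∀ d i (mism : Int) (mps : List Int), m.length - i = d → mism ≤ maxm →
      (if mism + ((List.range' i (m.length - i)).filter (pvPred s m pos)).length ≤ maxm
       then pvScanInner s m pos maxm i mism mps =
         (mism + ((List.range' i (m.length - i)).filter (pvPred s m pos)).length,
          mps ++ ((List.range' i (m.length - i)).filter (pvPred s m pos)).map (fun k : Nat => (k : Int)))
       else maxm < (pvScanInner s m pos maxm i mism mps).1) := by
  intro d
  induction d with
  | zero =>
    intro i mism mps hd hle
    have hi : ¬ i < m.length := by omega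
    simp only [hd, List.range'_zero, List.filter_nil, List.length_nil]
    rw [pvScanInner, if_neg hi]
    simp [hle]
  | succ d ih =>
    intro i mism mps hd hle
    have hi : i < m.length := by omega
    have hrange : List.range' i (m.length - i) = i :: List.range' (i+1) (m.length - (i+1)) := by
      have : m.length - i = (m.length - (i+1)) + 1 := by omega
      rw [this, List.range'_succ]
    rw [hrange]
    by_cases hp : PySem.List.pyGetD s (pos + (i : Int)) '?' ≠ PySem.List.pyGetD m (i : Int) '?'
    · have hpb : pvPred s m pos i = true := by unfold pvPred; exact decide_eq_true hp
      rw [List.filter_cons_of_pos hpb]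
      by_cases hbrk : mism + 1 > maxm
      · have hcond : ¬ (mism + (i :: (List.range' (i+1) (m.length - (i+1))).filter (pvPred s m pos)).length ≤ maxm) := by
          simp only [List.length_cons]
          push_cast
          omega
        rw [if_neg hcond]
        rw [pvScanInner, if_pos hi, if_pos hp]
        simp only [if_pos hbrk]
        omega
      · have ih' := ih (i+1) (mism + 1) (mps ++ [(i : Int)]) (by omega) (by omega)
        rw [pvScanInner, if_pos hi, if_pos hp]
        simp only [if_neg hbrk]
        simp only [List.length_cons]
        rw [show m.length - (i+1) = d from by omega] at ih'
        rw [show m.length - (i+1) = d from by omega]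
        by_cases hc : (mism + 1) + ((List.range' (i+1) d).filter (pvPred s m pos)).length ≤ maxm
        · rw [if_pos hc] at ih'
          rw [if_pos (by omega : mism + (((List.range' (i+1) d).filter (pvPred s m pos)).length + 1 : Nat) ≤ maxm)]
          rw [ih']
          simp only [Prod.mk.injEq]
          refine ⟨by push_cast; ring, by simp⟩
        · rw [if_neg hc] at ih'
          rw [if_neg (by push_cast at hc ⊢; omega)]
          exact ih'
    · have hpb : pvPred s m pos i = false := by unfold pvPred; exact decide_eq_false hp
      rw [List.filter_cons_of_neg (by simp [hpb])]
      have ih' := ih (i+1) mism mps (by omega) hle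
      rw [show m.length - (i+1) = d from by omega] at ih'
      rw [pvScanInner, if_pos hi, if_neg hp]
      rw [show m.length - (i+1) = d from by omega]
      exact ih'

def pvAccA (s m : List Char) (maxm pos : Int) : Bool :=
  let r := pvScanInner s m pos maxm 0 0 []
  if r.1 ≤ maxm then
    (if r.1 = 0 then true
     else is_valid_telomeric_variant (PySem.List.slice s (some pos) (some (pos + (m.length : Int)))) m r.2)
  else false

theorem pvScanOuter_eq (s m : List Char) (maxm : Int) :
    ∀ d (pos : Int) (acc : List Int), ((s.length : Int) - (m.length : Int) + 1 - pos).toNat = d →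
      pvScanOuter s m maxm pos acc =
        acc ++ (PySem.List.pyRange pos ((s.length : Int) - (m.length : Int) + 1) 1).filter (pvAccA s m maxm) := by
  intro d
  induction d with
  | zero =>
    intro pos acc hd
    have h : ¬ pos ≤ (s.length : Int) - (m.length : Int) := by omega
    rw [pvScanOuter, dif_neg h, PySem.List.pyRange_one_eq_nil (by omega)]
    simp
  | succ d ih =>
    intro pos acc hd
    have h : pos ≤ (s.length : Int) - (m.length : Int) := by omega
    have hstep : ∀ acc : List Int,
        (if (pvScanInner s m pos maxm 0 0 []).1 ≤ maxm then
          (if (if (pvScanInner s m pos maxm 0 0 []).1 = 0 then true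
               else is_valid_telomeric_variant
                 (PySem.List.slice s (some pos) (some (pos + (m.length : Int)))) m
                 (pvScanInner s m pos maxm 0 0 []).2) then acc ++ [pos] else acc)
         else acc) = acc ++ (if pvAccA s m maxm pos then [pos] else []) := by
      intro acc2
      unfold pvAccA
      by_cases h1 : (pvScanInner s m pos maxm 0 0 []).1 ≤ maxm
      · simp only [if_pos h1]
        by_cases h2 : (if (pvScanInner s m pos maxm 0 0 []).1 = 0 then true
               else is_valid_telomeric_variant
                 (PySem.List.slice s (some pos) (some (pos + (m.length : Int)))) m
                 (pvScanInner s m pos maxm 0 0 []).2) = true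
        · rw [h2]; simp
        · rw [Bool.not_eq_true] at h2; rw [h2]; simp
      · simp [h1]
    have hd' : ((s.length : Int) - (m.length : Int) + 1 - (pos + 1)).toNat = d := by omega
    have hlt : pos < (s.length : Int) - (m.length : Int) + 1 := by omega
    rw [pvScanOuter, dif_pos h]
    dsimp only
    rw [hstep acc, ih (pos + 1) (acc ++ (if pvAccA s m maxm pos then [pos] else [])) hd']
    rw [PySem.List.pyRange_one_cons hlt, List.filter_cons]
    by_cases hA : pvAccA s m maxm pos
    · simp [hA]
    · rw [Bool.not_eq_true] at hA; simp [hA]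

def pvMset (seg m : List Char) : List Nat :=
  (List.range m.length).filter (fun k => decide (seg.getD k '?' ≠ m.getD k '?'))

theorem pvMset_mem (seg m : List Char) (k : Nat) :
    k ∈ pvMset seg m ↔ k < m.length ∧ seg.getD k '?' ≠ m.getD k '?' := by
  unfold pvMset
  simp [List.mem_filter]

theorem pvMset_nil_iff (seg m : List Char) (hlen : seg.length = m.length) :
    pvMset seg m = [] ↔ seg = m := by
  constructor
  · intro h
    apply List.ext_getElem hlen
    intro k hk1 hk2
    have hmem : ¬ (k < m.length ∧ seg.getD k '?' ≠ m.getD k '?') := by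
      rw [← pvMset_mem, h]
      simp
    have := not_and.mp hmem hk2
    rw [List.getD_eq_getElem _ _ hk1, List.getD_eq_getElem _ _ hk2] at this
    simpa using this
  · rintro rfl
    unfold pvMset
    rw [List.filter_eq_nil_iff]
    intro k hk
    simp

theorem pvIvvLenNeOne (seg m : List Char) (mps : List Int) (h : mps.length ≠ 1) :
    is_valid_telomeric_variant seg m mps = false := by
  unfold is_valid_telomeric_variant
  rw [if_pos h]

def pvAccB (s m : List Char) (maxm pos : Int) : Bool :=
  let window := PySem.List.slice s (some pos) (some (pos + (m.length : Int)))
  if window = m then true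
  else if maxm ≥ 1 then
    let i := pvFirstDiff window m 0
    decide (PySem.List.slice window (some (i + 1)) none = PySem.List.slice m (some (i + 1)) none ∧
      is_valid_telomeric_variant window m [i] = true)
  else false

theorem pvFirstDiff_spec (seg m : List Char) :
    ∀ (d k : Nat) (j : Nat) (rest : List Nat), m.length - k = d →
      (List.range' k (m.length - k)).filter (fun x => decide (seg.getD x '?' ≠ m.getD x '?')) = j :: rest →
      pvFirstDiff seg m k = (j : Int) := by
  intro d
  induction d with
  | zero =>
    intro k j rest hd hf
    rw [hd, List.range'_zero, List.filter_nil] at hf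
    exact absurd hf (by simp)
  | succ d ih =>
    intro k j rest hd hf
    have hk : k < m.length := by omega
    have hrange : List.range' k (m.length - k) = k :: List.range' (k+1) (m.length - (k+1)) := by
      rw [show m.length - k = (m.length - (k+1)) + 1 from by omega, List.range'_succ]
    rw [hrange, List.filter_cons] at hf
    by_cases hp : seg.getD k '?' ≠ m.getD k '?'
    · rw [if_pos (by simpa using hp)] at hf
      have hjk : j = k := by exact (List.cons_eq_cons.mp hf).1.symm
      rw [pvFirstDiff, if_pos hk, if_pos (by simpa using hp)]
      rw [hjk]
    · rw [if_neg (by simpa using hp)] at hf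
      rw [pvFirstDiff, if_pos hk, if_neg (by simpa using hp)]
      exact ih (k+1) j rest (by omega) hf

theorem pvSuffix_iff (seg m : List Char) (hlen : seg.length = m.length) (j : Nat) :
    seg.drop (j+1) = m.drop (j+1) ↔
      ∀ k, j < k → k < m.length → seg.getD k '?' = m.getD k '?' := by
  constructor
  · intro h k hjk hkm
    have h1 : (seg.drop (j+1)).getD (k - (j+1)) '?' = (m.drop (j+1)).getD (k - (j+1)) '?' := by rw [h]
    rw [List.getD_eq_getElem _ _ (by simp; omega), List.getD_eq_getElem _ _ (by simp; omega)] at h1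
    simp only [List.getElem_drop] at h1
    rw [List.getD_eq_getElem _ _ (by omega), List.getD_eq_getElem _ _ hkm]
    have hidx : j + 1 + (k - (j+1)) = k := by omega
    simp only [hidx] at h1
    exact h1
  · intro h
    apply List.ext_getElem (by simp [hlen])
    intro x hx1 hx2
    simp only [List.getElem_drop]
    have := h (j + 1 + x) (by omega) (by simp at hx2; omega)
    rw [List.getD_eq_getElem _ _ (by simp at hx1 ⊢; omega), List.getD_eq_getElem _ _ (by simp at hx2 ⊢; omega)] at this
    exact this

theorem pvMset_pairwise (seg m : List Char) : (pvMset seg m).Pairwise (· < ·) :=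
  List.Pairwise.filter _ List.pairwise_lt_range

theorem pvRest_nil_iff (seg m : List Char) (hlen : seg.length = m.length)
    (j : Nat) (rest : List Nat) (hms : pvMset seg m = j :: rest) :
    (rest = [] ↔ seg.drop (j+1) = m.drop (j+1)) := by
  have hpw := pvMset_pairwise seg m
  rw [hms] at hpw
  constructor
  · intro hr
    rw [(pvSuffix_iff seg m hlen j)]
    intro k hjk hkm
    have hnot : k ∉ pvMset seg m := by
      rw [hms, hr]
      simp
      omega
    rw [pvMset_mem] at hnot
    have := not_and.mp hnot hkm
    simpa using this
  · intro hsuf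
    rcases rest with _ | ⟨r, rest'⟩
    · rfl
    · have hrmem : r ∈ pvMset seg m := by rw [hms]; simp
      have hrj : j < r := by
        have := List.pairwise_cons.mp hpw
        exact this.1 r (by simp)
      have := (pvMset_mem seg m r).mp hrmem
      exact absurd ((pvSuffix_iff seg m hlen j).mp hsuf r hrj this.1) this.2

theorem pvAccA_eq_accB (s m : List Char) (maxm pos : Int)
    (hm0 : 0 ≤ maxm)
    (hp0 : 0 ≤ pos) (hpn : pos + (m.length : Int) ≤ (s.length : Int)) :
    pvAccA s m maxm pos = pvAccB s m maxm pos := by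
  unfold pvAccA pvAccB
  dsimp only
  generalize hs : PySem.List.slice s (some pos) (some (pos + (m.length : Int))) = seg
  have hseg : seg = (s.drop pos.toNat).take m.length := by
    rw [← hs, PySem.List.slice_toNat s hp0 (by omega)]
    congr 1
    omega
  have hlen : seg.length = m.length := by
    rw [hseg]
    simp
    omega
  have hgetD : ∀ k, k < m.length → seg.getD k '?' = s.getD (pos.toNat + k) '?' := by
    intro k hk
    rw [hseg]
    rw [List.getD_eq_getElem _ _ (by simp; omega), List.getD_eq_getElem _ _ (by omega)]
    rw [List.getElem_take, List.getElem_drop]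
  have hpred : ∀ k ∈ List.range m.length,
      pvPred s m pos k = (fun k => decide (seg.getD k '?' ≠ m.getD k '?')) k := by
    intro k hk
    simp only [List.mem_range] at hk
    unfold pvPred
    rw [decide_eq_decide]
    rw [hgetD k hk]
    rw [show pos + (k : Int) = ((pos.toNat + k : Nat) : Int) from by omega]
    rw [PySem.List.pyGetD_natCast]
    rw [show PySem.List.pyGetD m (k : Int) '?' = m.getD k '?' from by simp]
  have hF : (List.range' 0 (m.length - 0)).filter (pvPred s m pos) = pvMset seg m := by
    rw [Nat.sub_zero, ← List.range_eq_range']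
    exact List.filter_congr hpred
  by_cases hsm : seg = m
  · rw [if_pos hsm]
    have hFnil : pvMset seg m = [] := (pvMset_nil_iff seg m hlen).mpr hsm
    have hspec := pvScanInner_spec s m pos maxm m.length 0 0 [] (by omega) hm0
    rw [hF, hFnil] at hspec
    simp only [List.length_nil, Nat.cast_zero, add_zero, List.map_nil, List.append_nil] at hspec
    rw [if_pos (by omega)] at hspec
    rw [hspec]
    simp [hm0]
  · rw [if_neg hsm]
    obtain ⟨j, rest, hms⟩ : ∃ j rest, pvMset seg m = j :: rest := by
      rcases hmm : pvMset seg m with _ | ⟨j, rest⟩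
      · exact absurd ((pvMset_nil_iff seg m hlen).mp hmm) hsm
      · exact ⟨j, rest, rfl⟩
    have hjmem := (pvMset_mem seg m j).mp (by rw [hms]; simp)
    have hfd : pvFirstDiff seg m 0 = (j : Int) := by
      apply pvFirstDiff_spec seg m m.length 0 j rest (by omega)
      rw [Nat.sub_zero, ← List.range_eq_range']
      exact hms
    by_cases hm1 : maxm ≥ 1
    · rw [if_pos hm1]
      rw [hfd]
      have hdropSlice : PySem.List.slice seg (some ((j : Int) + 1)) none = seg.drop (j+1) := by
        rw [PySem.List.slice_from seg (by positivity)]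
        congr 1
      have hdropSliceM : PySem.List.slice m (some ((j : Int) + 1)) none = m.drop (j+1) := by
        rw [PySem.List.slice_from m (by positivity)]
        congr 1
      rw [hdropSlice, hdropSliceM]
      have hspec := pvScanInner_spec s m pos maxm m.length 0 0 [] (by omega) (by omega)
      rw [hF, hms] at hspec
      by_cases hrest : rest = []
      · subst hrest
        simp only [List.length_cons, List.length_nil, Nat.cast_one, zero_add,
          List.map_cons, List.map_nil, List.nil_append] at hspec
        rw [if_pos (by omega)] at hspec
        rw [hspec]
        simp only []
        rw [if_pos (show (1:Int) ≤ maxm from by omega), if_neg (show ¬((1:Int) = 0) from by omega)]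
        have hdrop : seg.drop (j+1) = m.drop (j+1) :=
          (pvRest_nil_iff seg m hlen j [] hms).mp rfl
        simp [hdrop]
      · have hdropNe : ¬ (seg.drop (j+1) = m.drop (j+1)) := by
          intro hdrop
          exact hrest ((pvRest_nil_iff seg m hlen j rest hms).mpr hdrop)
        have hcnt2 : 2 ≤ (j :: rest).length := by
          rcases rest with _ | _
          · exact absurd rfl hrest
          · simp
        rw [show (decide (seg.drop (j+1) = m.drop (j+1) ∧
            is_valid_telomeric_variant seg m [(j : Int)] = true)) = false from by
          simp [hdropNe]]
        by_cases hle : ((j :: rest).length : Int) ≤ maxm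
        · rw [if_pos (by omega)] at hspec
          rw [hspec]
          simp only []
          rw [if_pos (by omega)]
          rw [if_neg (by omega)]
          rw [pvIvvLenNeOne _ _ _ (by simp; omega)]
        · rw [if_neg (by omega)] at hspec
          rw [if_neg (by omega)]
    · rw [if_neg hm1]
      have hspec := pvScanInner_spec s m pos maxm m.length 0 0 [] (by omega) hm0
      rw [hF, hms] at hspec
      rw [if_neg (by simp only [List.length_cons]; push_cast; omega)] at hspec
      rw [if_neg (by omega)]

theorem pvMain (s m : List Char) (maxm : Int) (hm0 : 0 ≤ maxm) :
    pvScanOuter s m maxm 0 [] =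
      (PySem.List.pyRange 0 ((s.length : Int) - (m.length : Int) + 1) 1).foldl
        (fun acc pos =>
          let window := PySem.List.slice s (some pos) (some (pos + (m.length : Int)))
          if window = m then acc ++ [pos]
          else if maxm ≥ 1 then
            let i := pvFirstDiff window m 0
            if PySem.List.slice window (some (i + 1)) none = PySem.List.slice m (some (i + 1)) none ∧
                is_valid_telomeric_variant window m [i] = true then acc ++ [pos] else acc
          else acc) [] := by
  have hstep : (fun (acc : List Int) (pos : Int) =>
      let window := PySem.List.slice s (some pos) (some (pos + (m.length : Int)))
      if window = m then acc ++ [pos]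
      else if maxm ≥ 1 then
        let i := pvFirstDiff window m 0
        if PySem.List.slice window (some (i + 1)) none = PySem.List.slice m (some (i + 1)) none ∧
            is_valid_telomeric_variant window m [i] = true then acc ++ [pos] else acc
      else acc) =
      (fun acc pos => if pvAccB s m maxm pos then acc ++ [pos] else acc) := by
    funext acc pos
    unfold pvAccB
    dsimp only
    by_cases h1 : PySem.List.slice s (some pos) (some (pos + (m.length : Int))) = m
    · rw [if_pos h1, if_pos h1]
      simp
    · rw [if_neg h1, if_neg h1]
      by_cases h2 : maxm ≥ 1
      · rw [if_pos h2, if_pos h2]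
        by_cases h3 : PySem.List.slice (PySem.List.slice s (some pos) (some (pos + (m.length : Int))))
            (some (pvFirstDiff (PySem.List.slice s (some pos) (some (pos + (m.length : Int)))) m 0 + 1)) none =
            PySem.List.slice m (some (pvFirstDiff (PySem.List.slice s (some pos) (some (pos + (m.length : Int)))) m 0 + 1)) none ∧
            is_valid_telomeric_variant (PySem.List.slice s (some pos) (some (pos + (m.length : Int)))) m
              [pvFirstDiff (PySem.List.slice s (some pos) (some (pos + (m.length : Int)))) m 0] = true
        · rw [if_pos h3, if_pos (by simpa using h3)]
        · rw [if_neg h3, if_neg (by simpa using h3)]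
      · rw [if_neg h2, if_neg h2]
        simp
  rw [hstep]
  rw [pvScanOuter_eq s m maxm (((s.length : Int) - (m.length : Int) + 1 - 0).toNat) 0 [] rfl]
  rw [PySem.List.foldl_append_if_eq_filter]
  rw [List.nil_append, List.nil_append]
  apply List.filter_congr
  intro pos hpos
  rw [PySem.List.mem_pyRange_one] at hpos
  exact pvAccA_eq_accB s m maxm pos hm0 hpos.1 (by omega)

-- ===== VERDICT (by name: the statement is the Claim_ definition above) =====
theorem scan_motifs_in_sequence_spec : Claim_equal_scan_motifs_in_sequence := by
  intro sequence motif max_mismatches _ hpre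
  unfold Spec_scan_motifs_in_sequence
  unfold scan_motifs_in_sequence scan_motifs_in_sequence_alt
  exact pvMain _ _ _ hpre
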